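-- pv_equiv track=rewrite | github.com/inbhatt/AI-based-Interview-Analyzer | backend/features.py | extract_qa_pairs
-- ===== SOURCE A (Python) =====
-- def extract_qa_pairs(text, questions):
--     """
--     Extracts question-answer pairs from the text.
--     Each answer is the text between two consecutive questions.
--     """
--     qa_pairs = []
--
--     for i, question in enumerate(questions):
--         # Find the position of current question
--         question_start = text.find(question)
--         if question_start == -1:
--             continue
--
--         # Find the start of the answer (after the question)
--         answer_start = question_start + len(question)
--
--         # Find the end of the answer (start of next question or end of text)
--         if i + 1 < len(questions):
--             next_question = questions[i + 1]
--             answer_end = text.find(next_question, answer_start)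
--             if answer_end == -1:
--                 answer_end = len(text)
--         else:
--             answer_end = len(text)
--
--         # Extract answer
--         answer = text[answer_start:answer_end].strip()
--
--         # Only add if answer has substantial content
--         if len(answer) > 10:
--             qa_pairs.append({
--                 'question': question,
--                 'answer': answer
--             })
--
--     return qa_pairs
-- ===== SOURCE B (Python) =====
-- def extract_qa_pairs(text, questions):
--     n = len(text)
--     # Build an occurrence index once: every start position of each distinct question.
--     occ = {}
--     for q in questions:
--         if q not in occ:
--             ps = []
--             j = text.find(q)
--             while j != -1:
--                 ps.append(j)
--                 j = text.find(q, j + 1)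
--             occ[q] = ps
--     qa_pairs = []
--     for i, q in enumerate(questions):
--         ps = occ[q]
--         if not ps:
--             continue
--         answer_start = ps[0] + len(q)
--         if i + 1 < len(questions):
--             answer_end = next((p for p in occ[questions[i + 1]] if p >= answer_start), n)
--         else:
--             answer_end = n
--         answer = text[answer_start:answer_end].strip()
--         if len(answer) > 10:
--             qa_pairs.append({'question': q, 'answer': answer})
--     return qa_pairs
-- ===== Notes on version B (the rewrite author's own statement) =====
-- stated objective: alternative
-- what changed: B builds an occurrence index once (a dict mapping each distinct question to the sorted list of all its start positions in the text, collected with repeated find) and then answers each per-question lookup and each next-question-after-position query by scanning that list for the first position >= answer_start, instead of A's fresh substring searches inside the loop.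
import Mathlib
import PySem

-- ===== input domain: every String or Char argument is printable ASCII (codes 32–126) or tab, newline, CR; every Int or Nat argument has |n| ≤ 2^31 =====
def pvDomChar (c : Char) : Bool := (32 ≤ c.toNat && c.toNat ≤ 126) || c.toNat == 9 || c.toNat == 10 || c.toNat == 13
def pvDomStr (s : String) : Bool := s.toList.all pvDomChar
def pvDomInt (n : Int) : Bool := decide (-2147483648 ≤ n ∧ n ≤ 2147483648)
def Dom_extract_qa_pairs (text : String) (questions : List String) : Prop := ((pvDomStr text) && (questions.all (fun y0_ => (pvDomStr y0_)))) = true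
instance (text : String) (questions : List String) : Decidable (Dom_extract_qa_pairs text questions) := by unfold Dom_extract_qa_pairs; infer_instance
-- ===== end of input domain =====

-- B replaces A's per-question substring searches by an occurrence index (all start
-- positions of each distinct question, built once), answered by first-position-≥ lookups;
-- objective: alternative (not measured faster).

-- ===== PORT A =====
def extract_qa_pairs (text : String) (questions : List String) : List (List (String × String)) :=
  let tl := text.toList
  (PySem.List.enumerate questions 0).foldl (fun qa_pairs iq =>
    let question := iq.2
    let question_start := PySem.Chars.find tl question.toList
    if question_start = -1 then qa_pairs
    else
      let answer_start : Int := question_start + question.toList.length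
      let answer_end : Int :=
        if iq.1 + 1 < (questions.length : Int) then
          let next_question := PySem.List.pyGetD questions (iq.1 + 1) ""
          let e := PySem.Chars.findFrom tl next_question.toList answer_start none
          if e = -1 then (tl.length : Int) else e
        else (tl.length : Int)
      let answer := PySem.Chars.strip (PySem.Chars.slice tl (some answer_start) (some answer_end))
      if 10 < answer.length then qa_pairs ++ [[("question", question), ("answer", String.ofList answer)]]
      else qa_pairs) []

-- ===== PORT B =====
-- the 'while j != -1' occurrence-collecting loop of Source B (fuel bounds the iteration count)
def pvOccAux (s q : List Char) : Nat → Nat → List Nat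
  | _, 0 => []
  | start, fuel+1 =>
    let j := PySem.Chars.findFrom s q (start : Int) none
    if j = -1 then [] else j.toNat :: pvOccAux s q (j.toNat + 1) fuel

def pvOcc (s q : List Char) : List Nat := pvOccAux s q 0 (s.length + 2)

def pvBuildOcc (tl : List Char) (qs : List String) : PySem.Dict String (List Nat) :=
  qs.foldl (fun occ q => if occ.contains q then occ else occ.insert q (pvOcc tl q.toList)) PySem.Dict.empty

-- next((p for p in ps if p >= k), dflt)
def pvNextGe (ps : List Nat) (k : Int) (dflt : Int) : Int :=
  match ps.find? (fun (p : Nat) => decide (k ≤ (p : Int))) with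
  | some p => (p : Int)
  | none => dflt

def extract_qa_pairs_alt (text : String) (questions : List String) : List (List (String × String)) :=
  let tl := text.toList
  let n : Int := tl.length
  let occ := pvBuildOcc tl questions
  (PySem.List.enumerate questions 0).foldl (fun qa_pairs iq =>
    let q := iq.2
    match occ.getD q [] with
    | [] => qa_pairs
    | p :: _ =>
      let answer_start : Int := (p : Int) + q.toList.length
      let answer_end : Int :=
        if iq.1 + 1 < (questions.length : Int) then
          pvNextGe (occ.getD (PySem.List.pyGetD questions (iq.1 + 1) "") []) answer_start n
        else n
      let answer := PySem.Chars.strip (PySem.Chars.slice tl (some answer_start) (some answer_end))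
      if 10 < answer.length then qa_pairs ++ [[("question", q), ("answer", String.ofList answer)]]
      else qa_pairs) []

-- ===== PRECONDITION & SPEC =====
def Spec_extract_qa_pairs (text : String) (questions : List String) (out : List (List (String × String))) : Prop := out = extract_qa_pairs_alt text questions
instance (text : String) (questions : List String) (out : List (List (String × String))) : Decidable (Spec_extract_qa_pairs text questions out) := by unfold Spec_extract_qa_pairs; infer_instance

-- ===== CLAIM (what is proved, stated in full; the proofs are below) =====
def Claim_equal_extract_qa_pairs : Prop := ∀ (text : String) (questions : List String), Dom_extract_qa_pairs text questions → Spec_extract_qa_pairs text questions (extract_qa_pairs text questions)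

-- ===== LEMMAS AND PROOFS =====

-- a prefix occurrence at m ≥ k is an infix of the drop at k
theorem pv_prefix_drop_infix (s q : List Char) (k m : Nat) (hkm : k ≤ m)
    (h : q <+: s.drop m) : q <:+: s.drop k := by
  have hdd : s.drop m = (s.drop k).drop (m - k) := by
    rw [List.drop_drop]; congr 1; omega
  rw [hdd] at h
  exact (PySem.Chars.isIn_iff_infix q (s.drop k)).1
    ((PySem.Chars.exists_prefix_drop_iff_isIn q (s.drop k)).1 ⟨m - k, h⟩)

-- findFrom = -1 means no occurrence at any position ≥ k
theorem pv_ff_none (s q : List Char) (k : Nat) (hk : k ≤ s.length)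
    (h : PySem.Chars.findFrom s q (k : Int) none = -1) :
    ∀ m, k ≤ m → ¬ q <+: s.drop m := by
  intro m hm hp
  exact ((PySem.Chars.findFrom_natCast_eq_neg_one_iff s q k hk).1 h)
    (pv_prefix_drop_infix s q k m hm hp)

-- characterization: the first occurrence ≥ k is the value of findFrom
theorem pv_ff_char (s q : List Char) (k m : Nat) (hk : k ≤ s.length)
    (hm : q <+: s.drop m) (hkm : k ≤ m)
    (hmin : ∀ i, k ≤ i → i < m → ¬ q <+: s.drop i) :
    PySem.Chars.findFrom s q (k : Int) none = (m : Int) := by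
  have hne : PySem.Chars.findFrom s q (k : Int) none ≠ -1 := by
    intro h; exact pv_ff_none s q k hk h m hkm hm
  obtain ⟨h1, h2, h3⟩ := PySem.Chars.findFrom_natCast_spec s q k hk hne
  have hr0 : (0 : Int) ≤ PySem.Chars.findFrom s q (k : Int) none :=
    le_trans (Int.natCast_nonneg k) h1
  have hrn : (PySem.Chars.findFrom s q (k : Int) none).toNat = m := by
    rcases Nat.lt_trichotomy (PySem.Chars.findFrom s q (k : Int) none).toNat m with hlt | heq | hgt
    · exact absurd h2 (hmin _ (by omega) hlt)
    · exact heq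
    · exact absurd hm (h3 m hkm hgt)
  omega

theorem pv_ff_le_len (s q : List Char) (k : Nat) (hk : k ≤ s.length) :
    PySem.Chars.findFrom s q (k : Int) none ≤ (s.length : Int) := by
  rw [PySem.Chars.findFrom_natCast s q k hk]
  have hfl := PySem.Chars.find_le_length (s.drop k) q
  rw [List.length_drop] at hfl
  split <;> omega

-- core: searching the occurrence list for the first position ≥ k is findFrom
theorem pv_occAux_find? (s q : List Char) (k : Nat) (hk : k ≤ s.length) :
    ∀ (fuel start : Nat), start ≤ k → s.length + 2 ≤ fuel + start →
    (pvOccAux s q start fuel).find? (fun (p : Nat) => decide ((k : Int) ≤ (p : Int))) =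
      (if PySem.Chars.findFrom s q (k : Int) none = -1 then none
       else some (PySem.Chars.findFrom s q (k : Int) none).toNat) := by
  intro fuel
  induction fuel with
  | zero => intro start h1 h2; omega
  | succ fuel ih =>
    intro start h1 h2
    have hsl : start ≤ s.length := le_trans h1 hk
    simp only [pvOccAux]
    by_cases hj : PySem.Chars.findFrom s q (start : Int) none = -1
    · have hknone : PySem.Chars.findFrom s q (k : Int) none = -1 := by
        rw [PySem.Chars.findFrom_natCast_eq_neg_one_iff s q k hk]
        intro hinf
        obtain ⟨j', hp⟩ := (PySem.Chars.exists_prefix_drop_iff_isIn q (s.drop k)).2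
          ((PySem.Chars.isIn_iff_infix q (s.drop k)).2 hinf)
        rw [List.drop_drop] at hp
        exact pv_ff_none s q start hsl hj (k + j') (by omega) hp
      simp [hj, hknone]
    · obtain ⟨h1r, h2r, h3r⟩ := PySem.Chars.findFrom_natCast_spec s q start hsl hj
      have hr0 : (0 : Int) ≤ PySem.Chars.findFrom s q (start : Int) none :=
        le_trans (Int.natCast_nonneg start) h1r
      have hrlen := pv_ff_le_len s q start hsl
      have hsr : start ≤ (PySem.Chars.findFrom s q (start : Int) none).toNat := by omega
      rw [if_neg hj]
      by_cases hkr : k ≤ (PySem.Chars.findFrom s q (start : Int) none).toNat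
      · rw [List.find?_cons_of_pos (by simp; omega)]
        have hchar : PySem.Chars.findFrom s q (k : Int) none =
            ((PySem.Chars.findFrom s q (start : Int) none).toNat : Int) :=
          pv_ff_char s q k _ hk h2r hkr (fun i hki hit => h3r i (le_trans h1 hki) hit)
        rw [hchar]
        rw [if_neg (by omega)]
        simp only [Option.some.injEq]
        omega
      · rw [List.find?_cons_of_neg (by simp; omega)]
        exact ih ((PySem.Chars.findFrom s q (start : Int) none).toNat + 1) (by omega) (by omega)

theorem pv_find?_nonneg_head (l : List Nat) :
    l.find? (fun (p : Nat) => decide ((0 : Int) ≤ (p : Int))) = l.head? := by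
  cases l <;> simp

theorem pv_occ_head (s q : List Char) :
    (pvOcc s q).head? = (if PySem.Chars.find s q = -1 then none
      else some (PySem.Chars.find s q).toNat) := by
  have h := pv_occAux_find? s q 0 (Nat.zero_le _) (s.length + 2) 0 (Nat.le_refl _) (by omega)
  simp only [Nat.cast_zero] at h
  rw [pv_find?_nonneg_head] at h
  rw [PySem.Chars.findFrom_zero] at h
  unfold pvOcc
  exact h

theorem pv_buildOcc_getD (tl : List Char) :
    ∀ (qs : List String) (d : PySem.Dict String (List Nat)),
    (∀ x, d.contains x = true → d.getD x [] = pvOcc tl x.toList) →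
    ∀ q, (q ∈ qs ∨ d.contains q = true) →
    (qs.foldl (fun occ q' => if occ.contains q' then occ else occ.insert q' (pvOcc tl q'.toList)) d).getD q [] = pvOcc tl q.toList := by
  intro qs
  induction qs with
  | nil =>
    intro d hd q hq
    rcases hq with h | h
    · cases h
    · exact hd q h
  | cons a qs ih =>
    intro d hd q hq
    simp only [List.foldl_cons]
    apply ih
    · intro x hx
      by_cases hda : d.contains a = true
      · rw [if_pos hda] at hx ⊢
        exact hd x hx
      · rw [if_neg hda] at hx ⊢
        by_cases hxa : x = a
        · subst hxa; rw [PySem.Dict.getD_insert]; simp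
        · rw [PySem.Dict.getD_insert, if_neg hxa]
          rw [PySem.Dict.contains_insert] at hx
          simp only [Bool.or_eq_true, beq_iff_eq] at hx
          rcases hx with h | h
          · exact absurd h hxa
          · exact hd x h
    · rcases hq with hmem | hcon
      · rcases List.mem_cons.1 hmem with hqa | hqs
        · subst hqa
          right
          by_cases hda : d.contains q = true
          · rw [if_pos hda]; exact hda
          · rw [if_neg hda]
            apply PySem.Dict.contains_insert_self
        · exact Or.inl hqs
      · right
        by_cases hda : d.contains a = true
        · rw [if_pos hda]; exact hcon
        · rw [if_neg hda]
          rw [PySem.Dict.contains_insert]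
          simp [hcon]

theorem pv_buildOcc_getD_mem (tl : List Char) (qs : List String) (q : String) (hq : q ∈ qs) :
    (pvBuildOcc tl qs).getD q [] = pvOcc tl q.toList := by
  apply pv_buildOcc_getD
  · intro x hx
    rw [PySem.Dict.contains_empty] at hx
    cases hx
  · exact Or.inl hq

-- ===== VERDICT (by name: the statement is the Claim_ definition above) =====
-- the first occurrence ≥ K in the occurrence index is what A's findFrom-with-default computes
theorem pv_end_eq (tl nq : List Char) (K : Nat) (hK : K ≤ tl.length) :
    pvNextGe (pvOcc tl nq) (K : Int) (tl.length : Int) =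
      (if PySem.Chars.findFrom tl nq (K : Int) none = -1 then (tl.length : Int)
       else PySem.Chars.findFrom tl nq (K : Int) none) := by
  have hG := pv_occAux_find? tl nq K hK (tl.length + 2) 0 (Nat.zero_le _) (by omega)
  unfold pvNextGe pvOcc
  rw [hG]
  by_cases he : PySem.Chars.findFrom tl nq (K : Int) none = -1
  · simp [he]
  · obtain ⟨h1, _, _⟩ := PySem.Chars.findFrom_natCast_spec tl nq K hK he
    have h0 : (0 : Int) ≤ PySem.Chars.findFrom tl nq (K : Int) none :=
      le_trans (Int.natCast_nonneg K) h1
    simp [he, Int.toNat_of_nonneg h0]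

theorem extract_qa_pairs_spec : Claim_equal_extract_qa_pairs := by
  intro text questions _
  unfold Spec_extract_qa_pairs extract_qa_pairs extract_qa_pairs_alt
  apply Eq.symm
  apply PySem.List.foldl_congr_mem
  intro acc iq hiq
  obtain ⟨kidx, hki, hiqeq⟩ := (PySem.List.mem_enumerate_iff questions 0 iq).1 hiq
  have hqmem : questions[kidx] ∈ questions := List.getElem_mem hki
  subst hiqeq
  simp only [zero_add]
  rw [pv_buildOcc_getD_mem text.toList questions _ hqmem]
  by_cases hf1 : PySem.Chars.find text.toList questions[kidx].toList = -1
  · have hnil : pvOcc text.toList questions[kidx].toList = [] := by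
      have h := pv_occ_head text.toList questions[kidx].toList
      rw [if_pos hf1] at h
      exact List.head?_eq_none_iff.1 h
    rw [hnil, if_pos hf1]
  · have hf0 : (0 : Int) ≤ PySem.Chars.find text.toList questions[kidx].toList := by
      have := PySem.Chars.neg_one_le_find text.toList questions[kidx].toList
      omega
    obtain ⟨rest, hocc⟩ : ∃ rest, pvOcc text.toList questions[kidx].toList =
        (PySem.Chars.find text.toList questions[kidx].toList).toNat :: rest := by
      have h := pv_occ_head text.toList questions[kidx].toList
      rw [if_neg hf1] at h
      cases hpv : pvOcc text.toList questions[kidx].toList with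
      | nil => rw [hpv] at h; simp at h
      | cons p rest =>
        rw [hpv] at h
        simp only [List.head?_cons, Option.some.injEq] at h
        exact ⟨rest, by rw [h]⟩
    rw [hocc, if_neg hf1]
    dsimp only
    have hcast : ((PySem.Chars.find text.toList questions[kidx].toList).toNat : Int) =
        PySem.Chars.find text.toList questions[kidx].toList := Int.toNat_of_nonneg hf0
    rw [hcast]
    -- the answer ends agree
    by_cases hnext : (kidx : Int) + 1 < (questions.length : Int)
    · rw [if_pos hnext, if_pos hnext]
      have hnq : PySem.List.pyGetD questions ((kidx : Int) + 1) "" ∈ questions := by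
        have hcast2 : ((kidx : Int) + 1) = (((kidx + 1 : Nat)) : Int) := by push_cast; ring
        rw [hcast2, PySem.List.pyGetD_natCast]
        have hlt : kidx + 1 < questions.length := by omega
        rw [List.getD_eq_getElem _ _ hlt]
        exact List.getElem_mem hlt
      rw [pv_buildOcc_getD_mem text.toList questions _ hnq]
      have hKlen : (PySem.Chars.find text.toList questions[kidx].toList).toNat
          + questions[kidx].toList.length ≤ text.toList.length := by
        have hpre := (PySem.Chars.find_spec hf0).1
        have hl := hpre.length_le
        rw [List.length_drop] at hl
        have hfl := PySem.Chars.find_le_length text.toList questions[kidx].toList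
        omega
      have hKcast : (((PySem.Chars.find text.toList questions[kidx].toList).toNat
          + questions[kidx].toList.length : Nat) : Int) =
          PySem.Chars.find text.toList questions[kidx].toList
            + (questions[kidx].toList.length : Int) := by push_cast; omega
      have hend := pv_end_eq text.toList (PySem.List.pyGetD questions ((kidx : Int) + 1) "").toList
        ((PySem.Chars.find text.toList questions[kidx].toList).toNat
          + questions[kidx].toList.length) hKlen
      rw [hKcast] at hend
      rw [hend]
    · rw [if_neg hnext, if_neg hnext]
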